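-- pv_equiv track=rewrite | github.com/pypi-data/pypi-mirror-209 | packages/exam-angel/exam_angel-1.0.1.tar.gz/exam_angel-1.0.1/exam_angel/__init__.py | najkrotszy_podciag
-- ===== SOURCE A (Python) =====
-- def najkrotszy_podciag(ciag):
--     dlugosc = 1
--     min_dlugosc = 1
--     indeks_poczatkowy = 0
--
--     for i in range(1, len(ciag)):
--         if ciag[i] < ciag[i-1]:
--             dlugosc += 1
--         else:
--             if dlugosc < min_dlugosc:
--                 min_dlugosc = dlugosc
--                 indeks_poczatkowy = i - dlugosc
--             dlugosc = 1
--
--     if dlugosc < min_dlugosc: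
--         min_dlugosc = dlugosc
--         indeks_poczatkowy = len(ciag) - dlugosc
--
--     najkrotszy_podciag = ciag[indeks_poczatkowy:indeks_poczatkowy+min_dlugosc]
--     return najkrotszy_podciag
-- ===== SOURCE B (Python) =====
-- def najkrotszy_podciag(ciag):
--     # A's scan is degenerate: min_dlugosc starts at 1 and dlugosc is always >= 1,
--     # so the minimum is never updated and the result is always the first element's slice.
--     return ciag[:1]
-- ===== Notes on version B (the rewrite author's own statement) =====
-- stated objective: simpler
-- what changed: A's linear scan with run-length state is degenerate (dlugosc >= 1 = min_dlugosc always, so the minimum never updates) and is replaced by the closed-form slice ciag[:1] it always returns.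
import Mathlib
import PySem

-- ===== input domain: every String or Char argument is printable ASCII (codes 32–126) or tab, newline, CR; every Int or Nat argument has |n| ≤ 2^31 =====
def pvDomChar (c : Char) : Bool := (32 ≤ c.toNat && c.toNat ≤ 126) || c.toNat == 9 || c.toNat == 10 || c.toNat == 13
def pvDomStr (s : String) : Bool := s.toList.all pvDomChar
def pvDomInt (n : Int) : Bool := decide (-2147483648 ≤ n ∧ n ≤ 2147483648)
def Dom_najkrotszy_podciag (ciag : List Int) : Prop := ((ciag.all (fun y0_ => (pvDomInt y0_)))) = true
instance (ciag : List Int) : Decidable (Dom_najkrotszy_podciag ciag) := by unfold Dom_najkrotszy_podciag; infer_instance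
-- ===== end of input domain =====

-- B replaces A's degenerate run-length scan by the closed-form slice ciag[:1] A always returns.

-- ===== PORT A =====
def najkrotszy_podciag (ciag : List Int) : List Int :=
  let st := (PySem.List.pyRange 1 (ciag.length : Int) 1).foldl
    (fun (st : Int × Int × Int) i =>
      match st with
      | (dlugosc, min_dlugosc, indeks_poczatkowy) =>
        if PySem.List.pyGetD ciag i 0 < PySem.List.pyGetD ciag (i - 1) 0 then
          (dlugosc + 1, min_dlugosc, indeks_poczatkowy)
        else
          if dlugosc < min_dlugosc then
            (1, dlugosc, i - dlugosc)
          else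
            (1, min_dlugosc, indeks_poczatkowy))
    (1, 1, 0)
  match st with
  | (dlugosc, min_dlugosc, indeks_poczatkowy) =>
    let p : Int × Int :=
      if dlugosc < min_dlugosc then (dlugosc, (ciag.length : Int) - dlugosc)
      else (min_dlugosc, indeks_poczatkowy)
    PySem.List.slice ciag (some p.2) (some (p.2 + p.1))

-- ===== PORT B =====
def najkrotszy_podciag_alt (ciag : List Int) : List Int :=
  PySem.List.slice ciag none (some 1)

-- ===== PRECONDITION & SPEC =====
def Spec_najkrotszy_podciag (ciag : List Int) (out : List Int) : Prop := out = najkrotszy_podciag_alt ciag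
instance (ciag : List Int) (out : List Int) : Decidable (Spec_najkrotszy_podciag ciag out) := by unfold Spec_najkrotszy_podciag; infer_instance

-- ===== CLAIM (what is proved, stated in full; the proofs are below) =====
def Claim_equal_najkrotszy_podciag : Prop := ∀ (ciag : List Int), Dom_najkrotszy_podciag ciag → Spec_najkrotszy_podciag ciag (najkrotszy_podciag ciag)

-- ===== LEMMAS AND PROOFS =====

-- Loop invariant: the fold never changes min_dlugosc = 1 or indeks_poczatkowy = 0,
-- and keeps dlugosc ≥ 1 (so the update branch `dlugosc < min_dlugosc` never fires).
theorem najk_fold_inv (ciag : List Int) (l : List Int) : ∀ d : Int, 1 ≤ d →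
    ∃ d' : Int, 1 ≤ d' ∧
      l.foldl
        (fun (st : Int × Int × Int) i =>
          match st with
          | (dlugosc, min_dlugosc, indeks_poczatkowy) =>
            if PySem.List.pyGetD ciag i 0 < PySem.List.pyGetD ciag (i - 1) 0 then
              (dlugosc + 1, min_dlugosc, indeks_poczatkowy)
            else
              if dlugosc < min_dlugosc then
                (1, dlugosc, i - dlugosc)
              else
                (1, min_dlugosc, indeks_poczatkowy))
        (d, 1, 0) = (d', 1, 0) := by
  induction l with
  | nil => exact fun d hd => ⟨d, hd, rfl⟩
  | cons a t ih =>
    intro d hd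
    simp only [List.foldl_cons]
    by_cases h : PySem.List.pyGetD ciag a 0 < PySem.List.pyGetD ciag (a - 1) 0
    · simpa [h] using ih (d + 1) (by omega)
    · simpa [h, show ¬ d < 1 by omega] using ih 1 le_rfl

-- ===== VERDICT (by name: the statement is the Claim_ definition above) =====
theorem najkrotszy_podciag_spec : Claim_equal_najkrotszy_podciag := by
  intro ciag _
  unfold Spec_najkrotszy_podciag najkrotszy_podciag najkrotszy_podciag_alt
  obtain ⟨d', hd', heq⟩ :=
    najk_fold_inv ciag (PySem.List.pyRange 1 (ciag.length : Int) 1) 1 le_rfl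
  rw [heq]
  simp [show ¬ d' < 1 by omega]
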